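-- pv_equiv track=rewrite | github.com/velvetekk/zadankaxDDD | userClass.py | splitDate
-- ===== SOURCE A (Python) =====
-- def splitDate(date):
--     counter = 0
--     secCounter = 0
--     wBeg = 0
--     tmp = 0
--     dateDic = []
--
--     while counter < date.__len__():
--
--             if date[counter] == '.' or date[counter] ==  ':' or date[counter] ==  ' ':
--                 dateDic.append(date[wBeg:counter])
--                 wBeg = counter + 1
--
--             if counter == (date.__len__() - 1):
--                 dateDic.append(date[-2:])
--             counter += 1
--
--     return dateDic
-- ===== SOURCE B (Python) =====
-- def splitDate(date):
--     if not date: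
--         return []
--     canon = date.replace(':', '.').replace(' ', '.')
--     return canon.split('.')[:-1] + [date[-2:]]
-- ===== Notes on version B (the rewrite author's own statement) =====
-- stated objective: simpler
-- what changed: B replaces A's stateful index scan (running word start, in-loop last-index check) by separator normalisation plus a library split: map the separators to a single one with str.replace, take canon.split('.')[:-1], and append date[-2:]; no index bookkeeping remains.
import Mathlib
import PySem

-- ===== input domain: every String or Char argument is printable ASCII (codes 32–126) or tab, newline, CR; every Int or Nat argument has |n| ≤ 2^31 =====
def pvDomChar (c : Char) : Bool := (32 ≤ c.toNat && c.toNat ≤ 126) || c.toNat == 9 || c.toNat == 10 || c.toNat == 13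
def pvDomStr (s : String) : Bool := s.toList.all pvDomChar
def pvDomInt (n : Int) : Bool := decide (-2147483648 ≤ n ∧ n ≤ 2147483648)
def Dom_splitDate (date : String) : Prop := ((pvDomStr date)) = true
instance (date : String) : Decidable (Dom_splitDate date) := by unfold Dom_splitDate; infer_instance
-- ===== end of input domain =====

-- B normalises the separators by string replacement (':'→'.', ' '→'.') and lets str.split('.')
-- produce the pieces, dropping the final piece and appending date[-2:]; A scans index by index
-- with a running word-start. Objective: simpler (two library calls replace the stateful scan).

-- ===== PORT A =====
-- literal port of A's while-loop body: state st = (wBeg, dateDic), counter over range(len(date))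
def pvStepA (cs : List Char) (n : Int) (st : Int × List String) (counter : Int) :
    Int × List String :=
  let st :=
    if PySem.List.pyGetD cs counter ' ' == '.' || PySem.List.pyGetD cs counter ' ' == ':'
        || PySem.List.pyGetD cs counter ' ' == ' ' then
      (counter + 1, st.2 ++ [String.ofList (PySem.List.slice cs (some st.1) (some counter))])
    else st
  if counter == n - 1 then
    (st.1, st.2 ++ [String.ofList (PySem.List.slice cs (some (-2)) none)])
  else st

def splitDate (date : String) : List String :=
  let cs := date.toList
  ((PySem.List.pyRange 0 (PySem.List.len cs)).foldl (pvStepA cs (PySem.List.len cs)) (0, [])).2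

-- ===== PORT B =====
-- date.replace(old, new) for SINGLE characters old/new is exactly a character map (Python
-- replaces every occurrence; with |old| = |new| = 1 no overlaps exist), ported as List.map
def pvReplace1 (o n : Char) (cs : List Char) : List Char :=
  cs.map (fun c => if c == o then n else c)

-- canon.split('.') for the one-character separator '.' is exactly List.splitOn '.' on the chars
-- (pieces between occurrences, empty pieces kept, '' ↦ [''])
def splitDate_alt (date : String) : List String :=
  let cs := date.toList
  if cs.isEmpty then []
  else
    let canon := pvReplace1 ' ' '.' (pvReplace1 ':' '.' cs)
    (PySem.List.slice (List.splitOn '.' canon) none (some (-1))).map String.ofList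
      ++ [String.ofList (PySem.List.slice cs (some (-2)) none)]

-- ===== PRECONDITION & SPEC =====
def Spec_splitDate (date : String) (out : List String) : Prop := out = splitDate_alt date
instance (date : String) (out : List String) : Decidable (Spec_splitDate date out) := by unfold Spec_splitDate; infer_instance

-- ===== CLAIM =====
def Claim_equal_splitDate : Prop := ∀ (date : String), Dom_splitDate date → Spec_splitDate date (splitDate date)

-- ===== LEMMAS AND PROOFS =====

-- the separator test of both programs
def pvSep (c : Char) : Bool := c == '.' || c == ':' || c == ' '

-- A's loop body away from the last index: B-shaped guarded step
def pvGuard (cs : List Char) (st : Int × List String) (i : Int) : Int × List String :=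
  if PySem.List.pyGetD cs i ' ' == '.' || PySem.List.pyGetD cs i ' ' == ':'
      || PySem.List.pyGetD cs i ' ' == ' ' then
    (i + 1, st.2 ++ [String.ofList (PySem.List.slice cs (some st.1) (some i))])
  else st

-- structural split-on-separator (Python split semantics: empty pieces kept, [] ↦ [[]])
def pvSplitP : List Char → List (List Char)
  | [] => [[]]
  | c :: cs =>
    if pvSep c then [] :: pvSplitP cs
    else
      match pvSplitP cs with
      | [] => [[c]]
      | q :: qs => (c :: q) :: qs

lemma pvSplitP_ne_nil (cs : List Char) : pvSplitP cs ≠ [] := by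
  cases cs with
  | nil => simp [pvSplitP]
  | cons c t =>
    simp only [pvSplitP]
    split
    · simp
    · cases h : pvSplitP t <;> simp

-- the double replace + split('.') computes pvSplitP
lemma pv_canon_cons (c : Char) (t : List Char) :
    pvReplace1 ' ' '.' (pvReplace1 ':' '.' (c :: t))
      = (if pvSep c then '.' else c) :: pvReplace1 ' ' '.' (pvReplace1 ':' '.' t) := by
  simp only [pvReplace1, List.map_cons]
  congr 1
  by_cases h1 : c = '.' <;> by_cases h2 : c = ':' <;> by_cases h3 : c = ' ' <;>
    simp [pvSep, h1, h2, h3]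

lemma pv_split_eq (cs : List Char) :
    List.splitOn '.' (pvReplace1 ' ' '.' (pvReplace1 ':' '.' cs)) = pvSplitP cs := by
  induction cs with
  | nil => rfl
  | cons c t ih =>
    rw [pv_canon_cons]
    simp only [List.splitOn] at ih ⊢
    rw [List.splitOnP_cons, ih]
    by_cases hs : pvSep c
    · simp [pvSplitP, hs]
    · rw [if_neg hs]
      have hne : ((c == '.') = true) ↔ False := by
        simp only [pvSep, Bool.or_eq_true, beq_iff_eq, not_or] at hs
        simp [hs.1]
      rw [if_neg (by simp [hne])]
      simp only [pvSplitP, if_neg hs]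
      cases h : pvSplitP t with
      | nil => exact absurd h (pvSplitP_ne_nil t)
      | cons q qs => simp [List.modifyHead]

-- loop invariant: the guarded fold from index i with word start prev builds the split pieces
-- of the remaining suffix, the first one prefixed by the pending word cs[prev:i], last dropped
lemma pv_inv (cs : List Char) : ∀ (d i prev : Nat) (acc : List String),
    i + d = cs.length → prev ≤ i →
    ((PySem.List.pyRange (i : Int) (cs.length : Int)).foldl (pvGuard cs) ((prev : Int), acc)).2
      = acc ++ (((pvSplitP (cs.drop i)).modifyHead
          (((cs.drop prev).take (i - prev)) ++ ·)).dropLast).map String.ofList := by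
  intro d
  induction d with
  | zero =>
    intro i prev acc hlen hpi
    rw [PySem.List.pyRange_one_eq_nil (by omega)]
    have hdrop : cs.drop i = [] := by
      apply List.drop_eq_nil_of_le; omega
    simp [hdrop, pvSplitP, List.modifyHead]
  | succ d ih =>
    intro i prev acc hlen hpi
    have hi : i < cs.length := by omega
    have hcons : PySem.List.pyRange (i : Int) (cs.length : Int)
        = (i : Int) :: PySem.List.pyRange ((i : Int) + 1) (cs.length : Int) := by
      exact PySem.List.pyRange_one_cons (by exact_mod_cast hi)
    rw [hcons, List.foldl_cons]
    have hget : PySem.List.pyGetD cs (i : Int) ' ' = cs[i] := by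
      rw [PySem.List.pyGetD_natCast]
      exact List.getD_eq_getElem cs ' ' hi
    have hdropi : cs.drop i = cs[i] :: cs.drop (i + 1) := List.drop_eq_getElem_cons hi
    have hcast : ((i : Int) + 1) = ((i + 1 : Nat) : Int) := by push_cast; ring
    by_cases hs : pvSep cs[i]
    · have hguard : pvGuard cs ((prev : Int), acc) (i : Int)
          = (((i + 1 : Nat) : Int), acc ++ [String.ofList ((cs.drop prev).take (i - prev))]) := by
        simp only [pvGuard, hget]
        rw [if_pos (by simpa [pvSep] using hs)]
        rw [PySem.List.slice_natCast]
        rw [hcast]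
      rw [hguard, hcast]
      rw [ih (i + 1) (i + 1) _ (by omega) (le_refl _)]
      rw [hdropi]
      simp only [pvSplitP, if_pos hs]
      have h2 : (cs.drop (i + 1)).take (i + 1 - (i + 1)) = [] := by simp
      rw [h2]
      cases h : pvSplitP (cs.drop (i + 1)) with
      | nil => exact absurd h (pvSplitP_ne_nil _)
      | cons q qs =>
        simp [List.modifyHead]
    · have hguard : pvGuard cs ((prev : Int), acc) (i : Int) = ((prev : Int), acc) := by
        simp only [pvGuard, hget]
        rw [if_neg (by simpa [pvSep] using hs)]
      rw [hguard, hcast]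
      rw [ih (i + 1) prev _ (by omega) (by omega)]
      rw [hdropi]
      simp only [pvSplitP, if_neg hs]
      have htake : (cs.drop prev).take (i + 1 - prev) = (cs.drop prev).take (i - prev) ++ [cs[i]] := by
        have : i + 1 - prev = (i - prev) + 1 := by omega
        rw [this, List.take_add_one]
        have : (cs.drop prev)[i - prev]? = some cs[i] := by
          rw [List.getElem?_drop]
          rw [List.getElem?_eq_getElem (by omega)]
          congr 1
          congr 1
          omega
        rw [this]
        rfl
      cases h : pvSplitP (cs.drop (i + 1)) with
      | nil => exact absurd h (pvSplitP_ne_nil _)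
      | cons q qs => simp [List.modifyHead, htake]

-- away from the last index, A's step is the guarded step
lemma pvStepA_of_ne (cs : List Char) (n : Int) (st : Int × List String) (x : Int)
    (hx : x ≠ n - 1) : pvStepA cs n st x = pvGuard cs st x := by
  simp [pvStepA, pvGuard, hx]

-- at the last index, A's step is the guarded step followed by the date[-2:] append
lemma pvStepA_last (cs : List Char) (n : Int) (st : Int × List String) :
    pvStepA cs n st (n - 1)
      = ((pvGuard cs st (n - 1)).1,
         (pvGuard cs st (n - 1)).2 ++ [String.ofList (PySem.List.slice cs (some (-2)) none)]) := by
  simp only [pvStepA, pvGuard, beq_self_eq_true, if_true]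

-- A's whole loop = the guarded loop with one date[-2:] append at the end (n ≥ 1)
lemma pv_loop_eq (cs : List Char) (n : Int) (hn : 1 ≤ n) (st : Int × List String) :
    ((PySem.List.pyRange 0 n).foldl (pvStepA cs n) st).2
    = ((PySem.List.pyRange 0 n).foldl (pvGuard cs) st).2
      ++ [String.ofList (PySem.List.slice cs (some (-2)) none)] := by
  have h1 : PySem.List.pyRange 0 n = PySem.List.pyRange 0 (n - 1) ++ [n - 1] := by
    have h2 := PySem.List.pyRange_one_succ_right (a := 0) (b := n - 1) (by omega)
    rw [sub_add_cancel] at h2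
    exact h2
  rw [h1, List.foldl_append, List.foldl_append,
    PySem.List.foldl_congr_mem (PySem.List.pyRange 0 (n - 1)) (pvStepA cs n) (pvGuard cs) st
      (by
        intro acc x hx
        have hx' := (PySem.List.mem_pyRange_one).1 hx
        exact pvStepA_of_ne cs n acc x (by omega))]
  simp [List.foldl, pvStepA_last]

-- ===== VERDICT =====
theorem splitDate_spec : Claim_equal_splitDate := by
  intro date _
  simp only [Spec_splitDate, splitDate, splitDate_alt]
  by_cases h : date.toList = []
  · simp [h, PySem.List.len, PySem.List.pyRange]
  · have hn : 1 ≤ PySem.List.len date.toList := by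
      simp only [PySem.List.len]
      have := List.length_pos_iff.mpr h
      omega
    rw [pv_loop_eq date.toList (PySem.List.len date.toList) hn]
    have hinv := pv_inv date.toList date.toList.length 0 0 [] (by omega) (le_refl 0)
    simp only [Nat.cast_zero, List.drop_zero, Nat.sub_zero, List.take_zero, List.nil_append,
      List.nil_append] at hinv
    simp only [show (fun x : List Char => x) = id from rfl, List.modifyHead_id, id_eq] at hinv
    rw [if_neg (by simp [h])]
    rw [PySem.List.slice_to_neg_one, pv_split_eq]
    simp only [PySem.List.len]
    rw [hinv]
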